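-- pv_equiv track=rewrite | github.com/svetlanama/bio-phagent | scripts/process_amr_mechanisms.py | get_mechanism
-- ===== SOURCE A (Python) =====
-- MECHANISM_MAPPING = {
--     # Beta-lactamases (Drug Inactivation - Hydrolysis)
--     'bla': 'Beta-lactamase (Drug Inactivation)',
--
--     # Aminoglycoside-modifying enzymes (Drug Inactivation - Modification)
--     'aac': 'Aminoglycoside Acetyltransferase (Drug Inactivation)',
--     'aad': 'Aminoglycoside Adenylyltransferase (Drug Inactivation)',
--     'ant': 'Aminoglycoside Nucleotidyltransferase (Drug Inactivation)',
--     'aph': 'Aminoglycoside Phosphotransferase (Drug Inactivation)',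
--     'armA': 'Aminoglycoside Methyltransferase (Target Modification)',
--     'rmtA': 'Aminoglycoside Methyltransferase (Target Modification)',
--     'rmtB': 'Aminoglycoside Methyltransferase (Target Modification)',
--     'rmtC': 'Aminoglycoside Methyltransferase (Target Modification)',
--     'rmtD': 'Aminoglycoside Methyltransferase (Target Modification)',
--
--     # Efflux pumps
--     'tet': 'Tetracycline Efflux/Ribosomal Protection',
--     'oqx': 'RND Efflux Pump (Quinolone/Multidrug)',
--     'qep': 'Quinolone Efflux Pump',
--     'mef': 'Macrolide Efflux Pump',
--     'msr': 'Macrolide Efflux Pump',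
--     'floR': 'Chloramphenicol Efflux Pump',
--     'cml': 'Chloramphenicol Efflux Pump',
--     'cat': 'Chloramphenicol Acetyltransferase (Drug Inactivation)',
--     'qac': 'Quaternary Ammonium Compound Efflux',
--     'emr': 'Multidrug Efflux Pump',
--     'acr': 'RND Efflux Pump (Multidrug)',
--     'mdt': 'Multidrug Efflux Pump',
--     'norA': 'Quinolone Efflux Pump',
--     'norB': 'Quinolone Efflux Pump',
--     'norC': 'Quinolone Efflux Pump',
--
--     # Target modification/protection
--     'mcr': 'Colistin Resistance (Target Modification)',
--     'erm': 'Ribosome Methylase (Target Modification)',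
--     'cfr': 'Ribosome Methylase (Target Modification)',
--     'mph': 'Macrolide Phosphotransferase (Drug Inactivation)',
--     'lin': 'Lincosamide Nucleotidyltransferase (Drug Inactivation)',
--     'lnu': 'Lincosamide Nucleotidyltransferase (Drug Inactivation)',
--     'vat': 'Streptogramin Acetyltransferase (Drug Inactivation)',
--     'vgb': 'Streptogramin Lyase (Drug Inactivation)',
--
--     # Quinolone resistance
--     'qnr': 'Quinolone Resistance (Target Protection)',
--     'gyr': 'DNA Gyrase (Target Mutation)',
--     'par': 'Topoisomerase IV (Target Mutation)',
--
--     # Folate pathway inhibitors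
--     'dfr': 'Dihydrofolate Reductase (Target Bypass)',
--     'sul': 'Sulfonamide Resistance (Target Bypass)',
--
--     # Glycopeptide resistance
--     'van': 'Glycopeptide Resistance (Target Modification)',
--
--     # Fosfomycin resistance
--     'fos': 'Fosfomycin Resistance (Drug Inactivation/Target Modification)',
--
--     # Rifampicin resistance
--     'arr': 'Rifampicin ADP-ribosyltransferase (Drug Inactivation)',
--     'rpo': 'RNA Polymerase (Target Mutation)',
--
--     # Other
--     'str': 'Streptomycin Resistance',
--     'nim': 'Nitroimidazole Resistance',
--     'ere': 'Erythromycin Esterase (Drug Inactivation)',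
--     'lsa': 'Lincosamide-Streptogramin Efflux',
--     'optrA': 'ABC Transporter (Oxazolidinone/Phenicol Efflux)',
--     'poxtA': 'ABC Transporter (Oxazolidinone/Phenicol Efflux)',
-- }
--
-- def get_mechanism(gene_name):
--     """Determine resistance mechanism from gene name."""
--     gene_lower = gene_name.lower()
--
--     # Check exact matches first
--     for prefix, mechanism in MECHANISM_MAPPING.items():
--         if gene_lower.startswith(prefix.lower()):
--             return mechanism
--
--     # Fallback patterns
--     if 'bla' in gene_lower:
--         return 'Beta-lactamase (Drug Inactivation)'
--     if gene_lower.startswith('tet'):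
--         return 'Tetracycline Efflux/Ribosomal Protection'
--     if any(gene_lower.startswith(p) for p in ['aac', 'aad', 'ant', 'aph']):
--         return 'Aminoglycoside Modifying Enzyme (Drug Inactivation)'
--
--     return 'Other/Unknown Mechanism'
-- ===== SOURCE B (Python) =====
-- # The prefix table compiled offline into a trie (finite automaton) over the
-- # lowercased prefixes; mechanism strings deduplicated and referenced by index.
-- # get_mechanism walks at most 5 characters instead of scanning every table entry.
-- _MECHS = (
--     'Beta-lactamase (Drug Inactivation)',
--     'Aminoglycoside Acetyltransferase (Drug Inactivation)',
--     'Aminoglycoside Adenylyltransferase (Drug Inactivation)',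
--     'Aminoglycoside Nucleotidyltransferase (Drug Inactivation)',
--     'Aminoglycoside Phosphotransferase (Drug Inactivation)',
--     'Aminoglycoside Methyltransferase (Target Modification)',
--     'Tetracycline Efflux/Ribosomal Protection',
--     'RND Efflux Pump (Quinolone/Multidrug)',
--     'Quinolone Efflux Pump',
--     'Macrolide Efflux Pump',
--     'Chloramphenicol Efflux Pump',
--     'Chloramphenicol Acetyltransferase (Drug Inactivation)',
--     'Quaternary Ammonium Compound Efflux',
--     'Multidrug Efflux Pump',
--     'RND Efflux Pump (Multidrug)',
--     'Colistin Resistance (Target Modification)',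
--     'Ribosome Methylase (Target Modification)',
--     'Macrolide Phosphotransferase (Drug Inactivation)',
--     'Lincosamide Nucleotidyltransferase (Drug Inactivation)',
--     'Streptogramin Acetyltransferase (Drug Inactivation)',
--     'Streptogramin Lyase (Drug Inactivation)',
--     'Quinolone Resistance (Target Protection)',
--     'DNA Gyrase (Target Mutation)',
--     'Topoisomerase IV (Target Mutation)',
--     'Dihydrofolate Reductase (Target Bypass)',
--     'Sulfonamide Resistance (Target Bypass)',
--     'Glycopeptide Resistance (Target Modification)',
--     'Fosfomycin Resistance (Drug Inactivation/Target Modification)',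
--     'Rifampicin ADP-ribosyltransferase (Drug Inactivation)',
--     'RNA Polymerase (Target Mutation)',
--     'Streptomycin Resistance',
--     'Nitroimidazole Resistance',
--     'Erythromycin Esterase (Drug Inactivation)',
--     'Lincosamide-Streptogramin Efflux',
--     'ABC Transporter (Oxazolidinone/Phenicol Efflux)',
-- )
--
-- _NODES = (
--     ({'b': 1, 'a': 4, 'r': 15, 't': 22, 'o': 25, 'q': 28, 'm': 31, 'f': 36, 'c': 40, 'e': 47, 'n': 54, 'l': 68, 'v': 73, 'g': 80, 'p': 83, 'd': 86, 's': 89}, None),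
--     ({'l': 2}, None),
--     ({'a': 3}, None),
--     ({}, 0),
--     ({'a': 5, 'n': 8, 'p': 10, 'r': 12, 'c': 50}, None),
--     ({'c': 6, 'd': 7}, None),
--     ({}, 1),
--     ({}, 2),
--     ({'t': 9}, None),
--     ({}, 3),
--     ({'h': 11}, None),
--     ({}, 4),
--     ({'m': 13, 'r': 95}, None),
--     ({'a': 14}, None),
--     ({}, 5),
--     ({'m': 16, 'p': 96}, None),
--     ({'t': 17}, None),
--     ({'a': 18, 'b': 19, 'c': 20, 'd': 21}, None),
--     ({}, 5),
--     ({}, 5),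
--     ({}, 5),
--     ({}, 5),
--     ({'e': 23}, None),
--     ({'t': 24}, None),
--     ({}, 6),
--     ({'q': 26, 'p': 105}, None),
--     ({'x': 27}, None),
--     ({}, 7),
--     ({'e': 29, 'a': 45, 'n': 78}, None),
--     ({'p': 30}, None),
--     ({}, 8),
--     ({'e': 32, 's': 34, 'd': 52, 'c': 60, 'p': 66}, None),
--     ({'f': 33}, None),
--     ({}, 9),
--     ({'r': 35}, None),
--     ({}, 9),
--     ({'l': 37, 'o': 93}, None),
--     ({'o': 38}, None),
--     ({'r': 39}, None),
--     ({}, 10),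
--     ({'m': 41, 'a': 43, 'f': 64}, None),
--     ({'l': 42}, None),
--     ({}, 10),
--     ({'t': 44}, None),
--     ({}, 11),
--     ({'c': 46}, None),
--     ({}, 12),
--     ({'m': 48, 'r': 62}, None),
--     ({'r': 49}, None),
--     ({}, 13),
--     ({'r': 51}, None),
--     ({}, 14),
--     ({'t': 53}, None),
--     ({}, 13),
--     ({'o': 55, 'i': 100}, None),
--     ({'r': 56}, None),
--     ({'a': 57, 'b': 58, 'c': 59}, None),
--     ({}, 8),
--     ({}, 8),
--     ({}, 8),
--     ({'r': 61}, None),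
--     ({}, 15),
--     ({'m': 63, 'e': 102}, None),
--     ({}, 16),
--     ({'r': 65}, None),
--     ({}, 16),
--     ({'h': 67}, None),
--     ({}, 17),
--     ({'i': 69, 'n': 71, 's': 103}, None),
--     ({'n': 70}, None),
--     ({}, 18),
--     ({'u': 72}, None),
--     ({}, 18),
--     ({'a': 74, 'g': 76}, None),
--     ({'t': 75, 'n': 92}, None),
--     ({}, 19),
--     ({'b': 77}, None),
--     ({}, 20),
--     ({'r': 79}, None),
--     ({}, 21),
--     ({'y': 81}, None),
--     ({'r': 82}, None),
--     ({}, 22),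
--     ({'a': 84, 'o': 109}, None),
--     ({'r': 85}, None),
--     ({}, 23),
--     ({'f': 87}, None),
--     ({'r': 88}, None),
--     ({}, 24),
--     ({'u': 90, 't': 98}, None),
--     ({'l': 91}, None),
--     ({}, 25),
--     ({}, 26),
--     ({'s': 94}, None),
--     ({}, 27),
--     ({}, 28),
--     ({'o': 97}, None),
--     ({}, 29),
--     ({'r': 99}, None),
--     ({}, 30),
--     ({'m': 101}, None),
--     ({}, 31),
--     ({}, 32),
--     ({'a': 104}, None),
--     ({}, 33),
--     ({'t': 106}, None),
--     ({'r': 107}, None),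
--     ({'a': 108}, None),
--     ({}, 34),
--     ({'x': 110}, None),
--     ({'t': 111}, None),
--     ({'a': 112}, None),
--     ({}, 34),
-- )
--
-- def get_mechanism(gene_name):
--     """Determine resistance mechanism from gene name."""
--     gene_lower = gene_name.lower()
--     node = 0
--     for ch in gene_lower:
--         val = _NODES[node][1]
--         if val is not None:
--             return _MECHS[val]
--         node = _NODES[node][0].get(ch)
--         if node is None:
--             break
--     else:
--         val = _NODES[node][1]
--         if val is not None:
--             return _MECHS[val]
--     if 'bla' in gene_lower:
--         return _MECHS[0]
--     return 'Other/Unknown Mechanism'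
-- ===== Notes on version B (the rewrite author's own statement) =====
-- stated objective: alternative
-- what changed: B replaces A's linear startswith-scan over all 50 table entries (plus two unreachable fallbacks) by a precompiled trie (finite automaton) over the lowercased prefixes with deduplicated mechanism strings referenced by index: it walks at most 5 characters of the gene name instead of testing every entry.
import Mathlib
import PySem

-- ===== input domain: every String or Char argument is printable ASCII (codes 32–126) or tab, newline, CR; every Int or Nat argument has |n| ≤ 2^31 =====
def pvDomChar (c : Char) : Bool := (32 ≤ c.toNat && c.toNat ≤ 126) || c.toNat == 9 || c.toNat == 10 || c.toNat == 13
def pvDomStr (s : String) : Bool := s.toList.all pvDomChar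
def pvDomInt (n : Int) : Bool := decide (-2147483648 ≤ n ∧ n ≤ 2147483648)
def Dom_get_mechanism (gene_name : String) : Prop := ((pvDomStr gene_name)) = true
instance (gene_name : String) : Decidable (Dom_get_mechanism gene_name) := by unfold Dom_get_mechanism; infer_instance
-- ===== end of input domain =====

-- B replaces A's linear startswith-scan over the 50-entry table by a precompiled trie
-- (finite automaton) over the lowercased prefixes, walking at most 5 characters
-- (objective: alternative; same observable behaviour).

-- ===== PORT A =====
def MECHANISM_MAPPING : List (String × String) := [
    ("bla", "Beta-lactamase (Drug Inactivation)"),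
    ("aac", "Aminoglycoside Acetyltransferase (Drug Inactivation)"),
    ("aad", "Aminoglycoside Adenylyltransferase (Drug Inactivation)"),
    ("ant", "Aminoglycoside Nucleotidyltransferase (Drug Inactivation)"),
    ("aph", "Aminoglycoside Phosphotransferase (Drug Inactivation)"),
    ("armA", "Aminoglycoside Methyltransferase (Target Modification)"),
    ("rmtA", "Aminoglycoside Methyltransferase (Target Modification)"),
    ("rmtB", "Aminoglycoside Methyltransferase (Target Modification)"),
    ("rmtC", "Aminoglycoside Methyltransferase (Target Modification)"),
    ("rmtD", "Aminoglycoside Methyltransferase (Target Modification)"),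
    ("tet", "Tetracycline Efflux/Ribosomal Protection"),
    ("oqx", "RND Efflux Pump (Quinolone/Multidrug)"),
    ("qep", "Quinolone Efflux Pump"),
    ("mef", "Macrolide Efflux Pump"),
    ("msr", "Macrolide Efflux Pump"),
    ("floR", "Chloramphenicol Efflux Pump"),
    ("cml", "Chloramphenicol Efflux Pump"),
    ("cat", "Chloramphenicol Acetyltransferase (Drug Inactivation)"),
    ("qac", "Quaternary Ammonium Compound Efflux"),
    ("emr", "Multidrug Efflux Pump"),
    ("acr", "RND Efflux Pump (Multidrug)"),
    ("mdt", "Multidrug Efflux Pump"),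
    ("norA", "Quinolone Efflux Pump"),
    ("norB", "Quinolone Efflux Pump"),
    ("norC", "Quinolone Efflux Pump"),
    ("mcr", "Colistin Resistance (Target Modification)"),
    ("erm", "Ribosome Methylase (Target Modification)"),
    ("cfr", "Ribosome Methylase (Target Modification)"),
    ("mph", "Macrolide Phosphotransferase (Drug Inactivation)"),
    ("lin", "Lincosamide Nucleotidyltransferase (Drug Inactivation)"),
    ("lnu", "Lincosamide Nucleotidyltransferase (Drug Inactivation)"),
    ("vat", "Streptogramin Acetyltransferase (Drug Inactivation)"),
    ("vgb", "Streptogramin Lyase (Drug Inactivation)"),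
    ("qnr", "Quinolone Resistance (Target Protection)"),
    ("gyr", "DNA Gyrase (Target Mutation)"),
    ("par", "Topoisomerase IV (Target Mutation)"),
    ("dfr", "Dihydrofolate Reductase (Target Bypass)"),
    ("sul", "Sulfonamide Resistance (Target Bypass)"),
    ("van", "Glycopeptide Resistance (Target Modification)"),
    ("fos", "Fosfomycin Resistance (Drug Inactivation/Target Modification)"),
    ("arr", "Rifampicin ADP-ribosyltransferase (Drug Inactivation)"),
    ("rpo", "RNA Polymerase (Target Mutation)"),
    ("str", "Streptomycin Resistance"),
    ("nim", "Nitroimidazole Resistance"),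
    ("ere", "Erythromycin Esterase (Drug Inactivation)"),
    ("lsa", "Lincosamide-Streptogramin Efflux"),
    ("optrA", "ABC Transporter (Oxazolidinone/Phenicol Efflux)"),
    ("poxtA", "ABC Transporter (Oxazolidinone/Phenicol Efflux)")]

-- the 'for prefix, mechanism in MECHANISM_MAPPING.items(): if gene_lower.startswith(prefix.lower()): return mechanism' loop
def aScan : List (String × String) → String → Option String
  | [], _ => none
  | (p, m) :: rest, g =>
      if PySem.Str.startswith g (PySem.Str.lower p) then some m else aScan rest g

-- (the Python local gene_lower = gene_name.lower() is inlined)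
def get_mechanism (gene_name : String) : String :=
  match aScan MECHANISM_MAPPING (PySem.Str.lower gene_name) with
  | some m => m
  | none =>
    if PySem.Str.isIn "bla" (PySem.Str.lower gene_name) then "Beta-lactamase (Drug Inactivation)"
    else if PySem.Str.startswith (PySem.Str.lower gene_name) "tet" then "Tetracycline Efflux/Ribosomal Protection"
    else if ["aac", "aad", "ant", "aph"].any (fun p => PySem.Str.startswith (PySem.Str.lower gene_name) p) then
      "Aminoglycoside Modifying Enzyme (Drug Inactivation)"
    else "Other/Unknown Mechanism"

-- ===== PORT B =====
-- Source B's _MECHS: the mechanism strings, deduplicated, referenced by index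
def MECHS : List String := [
    "Beta-lactamase (Drug Inactivation)",
    "Aminoglycoside Acetyltransferase (Drug Inactivation)",
    "Aminoglycoside Adenylyltransferase (Drug Inactivation)",
    "Aminoglycoside Nucleotidyltransferase (Drug Inactivation)",
    "Aminoglycoside Phosphotransferase (Drug Inactivation)",
    "Aminoglycoside Methyltransferase (Target Modification)",
    "Tetracycline Efflux/Ribosomal Protection",
    "RND Efflux Pump (Quinolone/Multidrug)",
    "Quinolone Efflux Pump",
    "Macrolide Efflux Pump",
    "Chloramphenicol Efflux Pump",
    "Chloramphenicol Acetyltransferase (Drug Inactivation)",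
    "Quaternary Ammonium Compound Efflux",
    "Multidrug Efflux Pump",
    "RND Efflux Pump (Multidrug)",
    "Colistin Resistance (Target Modification)",
    "Ribosome Methylase (Target Modification)",
    "Macrolide Phosphotransferase (Drug Inactivation)",
    "Lincosamide Nucleotidyltransferase (Drug Inactivation)",
    "Streptogramin Acetyltransferase (Drug Inactivation)",
    "Streptogramin Lyase (Drug Inactivation)",
    "Quinolone Resistance (Target Protection)",
    "DNA Gyrase (Target Mutation)",
    "Topoisomerase IV (Target Mutation)",
    "Dihydrofolate Reductase (Target Bypass)",
    "Sulfonamide Resistance (Target Bypass)",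
    "Glycopeptide Resistance (Target Modification)",
    "Fosfomycin Resistance (Drug Inactivation/Target Modification)",
    "Rifampicin ADP-ribosyltransferase (Drug Inactivation)",
    "RNA Polymerase (Target Mutation)",
    "Streptomycin Resistance",
    "Nitroimidazole Resistance",
    "Erythromycin Esterase (Drug Inactivation)",
    "Lincosamide-Streptogramin Efflux",
    "ABC Transporter (Oxazolidinone/Phenicol Efflux)"]
-- Source B's _NODES: the prefix trie, node 0 = root; a node is (outgoing edges, terminal mechanism index)
def TRIE : List (PySem.Dict Char Nat × Option Nat) := [
    (PySem.Dict.mk [('b', 1), ('a', 4), ('r', 15), ('t', 22), ('o', 25), ('q', 28), ('m', 31), ('f', 36), ('c', 40), ('e', 47), ('n', 54), ('l', 68), ('v', 73), ('g', 80), ('p', 83), ('d', 86), ('s', 89)], none),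
    (PySem.Dict.mk [('l', 2)], none),
    (PySem.Dict.mk [('a', 3)], none),
    (PySem.Dict.mk [], some 0),
    (PySem.Dict.mk [('a', 5), ('n', 8), ('p', 10), ('r', 12), ('c', 50)], none),
    (PySem.Dict.mk [('c', 6), ('d', 7)], none),
    (PySem.Dict.mk [], some 1),
    (PySem.Dict.mk [], some 2),
    (PySem.Dict.mk [('t', 9)], none),
    (PySem.Dict.mk [], some 3),
    (PySem.Dict.mk [('h', 11)], none),
    (PySem.Dict.mk [], some 4),
    (PySem.Dict.mk [('m', 13), ('r', 95)], none),
    (PySem.Dict.mk [('a', 14)], none),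
    (PySem.Dict.mk [], some 5),
    (PySem.Dict.mk [('m', 16), ('p', 96)], none),
    (PySem.Dict.mk [('t', 17)], none),
    (PySem.Dict.mk [('a', 18), ('b', 19), ('c', 20), ('d', 21)], none),
    (PySem.Dict.mk [], some 5),
    (PySem.Dict.mk [], some 5),
    (PySem.Dict.mk [], some 5),
    (PySem.Dict.mk [], some 5),
    (PySem.Dict.mk [('e', 23)], none),
    (PySem.Dict.mk [('t', 24)], none),
    (PySem.Dict.mk [], some 6),
    (PySem.Dict.mk [('q', 26), ('p', 105)], none),
    (PySem.Dict.mk [('x', 27)], none),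
    (PySem.Dict.mk [], some 7),
    (PySem.Dict.mk [('e', 29), ('a', 45), ('n', 78)], none),
    (PySem.Dict.mk [('p', 30)], none),
    (PySem.Dict.mk [], some 8),
    (PySem.Dict.mk [('e', 32), ('s', 34), ('d', 52), ('c', 60), ('p', 66)], none),
    (PySem.Dict.mk [('f', 33)], none),
    (PySem.Dict.mk [], some 9),
    (PySem.Dict.mk [('r', 35)], none),
    (PySem.Dict.mk [], some 9),
    (PySem.Dict.mk [('l', 37), ('o', 93)], none),
    (PySem.Dict.mk [('o', 38)], none),
    (PySem.Dict.mk [('r', 39)], none),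
    (PySem.Dict.mk [], some 10),
    (PySem.Dict.mk [('m', 41), ('a', 43), ('f', 64)], none),
    (PySem.Dict.mk [('l', 42)], none),
    (PySem.Dict.mk [], some 10),
    (PySem.Dict.mk [('t', 44)], none),
    (PySem.Dict.mk [], some 11),
    (PySem.Dict.mk [('c', 46)], none),
    (PySem.Dict.mk [], some 12),
    (PySem.Dict.mk [('m', 48), ('r', 62)], none),
    (PySem.Dict.mk [('r', 49)], none),
    (PySem.Dict.mk [], some 13),
    (PySem.Dict.mk [('r', 51)], none),
    (PySem.Dict.mk [], some 14),
    (PySem.Dict.mk [('t', 53)], none),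
    (PySem.Dict.mk [], some 13),
    (PySem.Dict.mk [('o', 55), ('i', 100)], none),
    (PySem.Dict.mk [('r', 56)], none),
    (PySem.Dict.mk [('a', 57), ('b', 58), ('c', 59)], none),
    (PySem.Dict.mk [], some 8),
    (PySem.Dict.mk [], some 8),
    (PySem.Dict.mk [], some 8),
    (PySem.Dict.mk [('r', 61)], none),
    (PySem.Dict.mk [], some 15),
    (PySem.Dict.mk [('m', 63), ('e', 102)], none),
    (PySem.Dict.mk [], some 16),
    (PySem.Dict.mk [('r', 65)], none),
    (PySem.Dict.mk [], some 16),
    (PySem.Dict.mk [('h', 67)], none),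
    (PySem.Dict.mk [], some 17),
    (PySem.Dict.mk [('i', 69), ('n', 71), ('s', 103)], none),
    (PySem.Dict.mk [('n', 70)], none),
    (PySem.Dict.mk [], some 18),
    (PySem.Dict.mk [('u', 72)], none),
    (PySem.Dict.mk [], some 18),
    (PySem.Dict.mk [('a', 74), ('g', 76)], none),
    (PySem.Dict.mk [('t', 75), ('n', 92)], none),
    (PySem.Dict.mk [], some 19),
    (PySem.Dict.mk [('b', 77)], none),
    (PySem.Dict.mk [], some 20),
    (PySem.Dict.mk [('r', 79)], none),
    (PySem.Dict.mk [], some 21),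
    (PySem.Dict.mk [('y', 81)], none),
    (PySem.Dict.mk [('r', 82)], none),
    (PySem.Dict.mk [], some 22),
    (PySem.Dict.mk [('a', 84), ('o', 109)], none),
    (PySem.Dict.mk [('r', 85)], none),
    (PySem.Dict.mk [], some 23),
    (PySem.Dict.mk [('f', 87)], none),
    (PySem.Dict.mk [('r', 88)], none),
    (PySem.Dict.mk [], some 24),
    (PySem.Dict.mk [('u', 90), ('t', 98)], none),
    (PySem.Dict.mk [('l', 91)], none),
    (PySem.Dict.mk [], some 25),
    (PySem.Dict.mk [], some 26),
    (PySem.Dict.mk [('s', 94)], none),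
    (PySem.Dict.mk [], some 27),
    (PySem.Dict.mk [], some 28),
    (PySem.Dict.mk [('o', 97)], none),
    (PySem.Dict.mk [], some 29),
    (PySem.Dict.mk [('r', 99)], none),
    (PySem.Dict.mk [], some 30),
    (PySem.Dict.mk [('m', 101)], none),
    (PySem.Dict.mk [], some 31),
    (PySem.Dict.mk [], some 32),
    (PySem.Dict.mk [('a', 104)], none),
    (PySem.Dict.mk [], some 33),
    (PySem.Dict.mk [('t', 106)], none),
    (PySem.Dict.mk [('r', 107)], none),
    (PySem.Dict.mk [('a', 108)], none),
    (PySem.Dict.mk [], some 34),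
    (PySem.Dict.mk [('x', 110)], none),
    (PySem.Dict.mk [('t', 111)], none),
    (PySem.Dict.mk [('a', 112)], none),
    (PySem.Dict.mk [], some 34)]
-- _NODES[node] (always indexed in range in Source B; getD is exact there)
def nodeAt (n : Nat) : PySem.Dict Char Nat × Option Nat := TRIE.getD n (PySem.Dict.empty, none)

-- Source B's for-loop over the characters: terminal check, then edges.get(ch), break on a miss;
-- the for-else checks the final node's terminal index
def walk : List Char → Nat → Option Nat
  | [], node => (nodeAt node).2
  | c :: cs, node =>
      match (nodeAt node).2 with
      | some val => some val
      | none =>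
          match PySem.Dict.get? (nodeAt node).1 c with
          | none => none
          | some nxt => walk cs nxt

-- (the Python local gene_lower = gene_name.lower() is inlined)
def get_mechanism_alt (gene_name : String) : String :=
  match walk (PySem.Str.lower gene_name).toList 0 with
  | some val => MECHS.getD val ""
  | none =>
    if PySem.Str.isIn "bla" (PySem.Str.lower gene_name) then MECHS.getD 0 ""
    else "Other/Unknown Mechanism"

-- ===== PRECONDITION & SPEC =====
def Spec_get_mechanism (gene_name : String) (out : String) : Prop := out = get_mechanism_alt gene_name
instance (gene_name : String) (out : String) : Decidable (Spec_get_mechanism gene_name out) := by unfold Spec_get_mechanism; infer_instance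

-- ===== CLAIM (what is proved, stated in full; the proofs are below) =====
def Claim_equal_get_mechanism : Prop := ∀ (gene_name : String), Dom_get_mechanism gene_name → Spec_get_mechanism gene_name (get_mechanism gene_name)

-- ===== LEMMAS AND PROOFS =====

-- lowered mapping table (proof-side literal)
def LTab : List (String × String) := [
    ("bla", "Beta-lactamase (Drug Inactivation)"),
    ("aac", "Aminoglycoside Acetyltransferase (Drug Inactivation)"),
    ("aad", "Aminoglycoside Adenylyltransferase (Drug Inactivation)"),
    ("ant", "Aminoglycoside Nucleotidyltransferase (Drug Inactivation)"),
    ("aph", "Aminoglycoside Phosphotransferase (Drug Inactivation)"),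
    ("arma", "Aminoglycoside Methyltransferase (Target Modification)"),
    ("rmta", "Aminoglycoside Methyltransferase (Target Modification)"),
    ("rmtb", "Aminoglycoside Methyltransferase (Target Modification)"),
    ("rmtc", "Aminoglycoside Methyltransferase (Target Modification)"),
    ("rmtd", "Aminoglycoside Methyltransferase (Target Modification)"),
    ("tet", "Tetracycline Efflux/Ribosomal Protection"),
    ("oqx", "RND Efflux Pump (Quinolone/Multidrug)"),
    ("qep", "Quinolone Efflux Pump"),
    ("mef", "Macrolide Efflux Pump"),
    ("msr", "Macrolide Efflux Pump"),
    ("flor", "Chloramphenicol Efflux Pump"),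
    ("cml", "Chloramphenicol Efflux Pump"),
    ("cat", "Chloramphenicol Acetyltransferase (Drug Inactivation)"),
    ("qac", "Quaternary Ammonium Compound Efflux"),
    ("emr", "Multidrug Efflux Pump"),
    ("acr", "RND Efflux Pump (Multidrug)"),
    ("mdt", "Multidrug Efflux Pump"),
    ("nora", "Quinolone Efflux Pump"),
    ("norb", "Quinolone Efflux Pump"),
    ("norc", "Quinolone Efflux Pump"),
    ("mcr", "Colistin Resistance (Target Modification)"),
    ("erm", "Ribosome Methylase (Target Modification)"),
    ("cfr", "Ribosome Methylase (Target Modification)"),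
    ("mph", "Macrolide Phosphotransferase (Drug Inactivation)"),
    ("lin", "Lincosamide Nucleotidyltransferase (Drug Inactivation)"),
    ("lnu", "Lincosamide Nucleotidyltransferase (Drug Inactivation)"),
    ("vat", "Streptogramin Acetyltransferase (Drug Inactivation)"),
    ("vgb", "Streptogramin Lyase (Drug Inactivation)"),
    ("qnr", "Quinolone Resistance (Target Protection)"),
    ("gyr", "DNA Gyrase (Target Mutation)"),
    ("par", "Topoisomerase IV (Target Mutation)"),
    ("dfr", "Dihydrofolate Reductase (Target Bypass)"),
    ("sul", "Sulfonamide Resistance (Target Bypass)"),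
    ("van", "Glycopeptide Resistance (Target Modification)"),
    ("fos", "Fosfomycin Resistance (Drug Inactivation/Target Modification)"),
    ("arr", "Rifampicin ADP-ribosyltransferase (Drug Inactivation)"),
    ("rpo", "RNA Polymerase (Target Mutation)"),
    ("str", "Streptomycin Resistance"),
    ("nim", "Nitroimidazole Resistance"),
    ("ere", "Erythromycin Esterase (Drug Inactivation)"),
    ("lsa", "Lincosamide-Streptogramin Efflux"),
    ("optra", "ABC Transporter (Oxazolidinone/Phenicol Efflux)"),
    ("poxta", "ABC Transporter (Oxazolidinone/Phenicol Efflux)")]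

-- the predicate A's scan decides entry-by-entry
def swPred (g : String) : String × String → Bool := fun kv => PySem.Str.startswith g kv.1

-- the key/value set sitting below a trie node (fuel-bounded enumeration), and the
-- pair-to-table-entry view
def sub : Nat → Nat → List (List Char × Nat)
  | 0, _ => []
  | fuel + 1, n =>
      (match (nodeAt n).2 with | some i => [([], i)] | none => []) ++
      (nodeAt n).1.items.flatMap (fun e => (sub fuel e.2).map (fun p => (e.1 :: p.1, p.2)))

def mapfn (p : List Char × Nat) : String × String := (String.ofList p.1, MECHS.getD p.2 "")

-- ground facts about the literal tables, checked by the kernel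
set_option maxRecDepth 65536 in
lemma lower_map_eq : MECHANISM_MAPPING.map (fun kv => (PySem.Str.lower kv.1, kv.2)) = LTab := by decide

set_option maxRecDepth 65536 in
lemma keys_unique : ∀ x ∈ LTab, ∀ y ∈ LTab, x.1.toList <+: y.1.toList → x = y := by decide

set_option maxRecDepth 65536 in
lemma sub_root_perm : ((sub 6 0).map mapfn).Perm LTab := by decide

set_option maxRecDepth 65536 in
lemma sub_rec : ∀ n, n < 113 → sub 6 n =
    (match (nodeAt n).2 with | some i => [([], i)] | none => []) ++
    (nodeAt n).1.items.flatMap (fun e => (sub 6 e.2).map (fun p => (e.1 :: p.1, p.2))) := by decide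

set_option maxRecDepth 65536 in
lemma edge_lt : ∀ n, n < 113 → ∀ e ∈ (nodeAt n).1.items, e.2 < 113 := by decide

set_option maxRecDepth 65536 in
lemma edge_nodup : ∀ n, n < 113 → ((nodeAt n).1.items.map (fun e => e.1)).Nodup := by decide

-- generic helpers
lemma find?_congr' {α : Type} (l : List α) (p q : α → Bool) (h : ∀ x ∈ l, p x = q x) :
    l.find? p = l.find? q := by
  induction l with
  | nil => rfl
  | cons a l ih =>
      rw [List.find?_cons, List.find?_cons, h a (List.mem_cons_self)]
      cases q a
      · exact ih fun x hx => h x (List.mem_cons_of_mem _ hx)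
      · rfl

lemma find?_eq_of_unique {α : Type} (l l' : List α) (p : α → Bool)
    (hperm : l.Perm l') (hu : ∀ x ∈ l, ∀ y ∈ l, p x → p y → x = y) :
    l.find? p = l'.find? p := by
  cases h : l.find? p with
  | none =>
      symm
      rw [List.find?_eq_none] at h ⊢
      exact fun x hx => h x (hperm.mem_iff.mpr hx)
  | some a =>
      have pa := List.find?_some h
      have ha := List.mem_of_find?_eq_some h
      cases h' : l'.find? p with
      | none => exact absurd pa ((List.find?_eq_none.mp h') a (hperm.mem_iff.mp ha))
      | some b =>
          have pb := List.find?_some h'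
          have hb := hperm.mem_iff.mpr (List.mem_of_find?_eq_some h')
          exact congrArg some (hu a ha b hb pa pb)

-- A's scan is first-match over the lowered table
lemma aScan_eq_find (l : List (String × String)) (g : String) :
    aScan l g =
      ((l.map (fun kv => (PySem.Str.lower kv.1, kv.2))).find? (swPred g)).map (fun kv => kv.2) := by
  induction l with
  | nil => rfl
  | cons kv rest ih =>
      obtain ⟨p, m⟩ := kv
      simp only [List.map_cons, List.find?_cons, swPred, aScan]
      cases PySem.Str.startswith g (PySem.Str.lower p)
      · simpa using ih
      · simp

-- at most one lowered key prefixes any given string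
lemma unique_match (g : String) :
    ∀ x ∈ LTab, ∀ y ∈ LTab, swPred g x → swPred g y → x = y := by
  intro x hx y hy px py
  simp only [swPred, PySem.Str.startswith_eq] at px py
  have hpx := (PySem.Chars.startswith_iff _ _).mp px
  have hpy := (PySem.Chars.startswith_iff _ _).mp py
  rcases List.prefix_or_prefix_of_prefix hpx hpy with h | h
  · exact keys_unique x hx y hy h
  · exact (keys_unique y hy x hx h).symm

-- the table predicate seen through mapfn is char-list prefix testing
lemma swPred_map (g : String) (p : List Char × Nat) :
    swPred g (mapfn p) = p.1.isPrefixOf g.toList := by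
  rw [Bool.eq_iff_iff]
  simp only [swPred, mapfn, PySem.Str.startswith_eq]
  rw [PySem.Chars.startswith_iff, List.isPrefixOf_iff_prefix]
  simp

-- dict lookup is first-match over the item list
lemma dict_get?_eq_find? {κ ν : Type} [BEq κ] (l : List (κ × ν)) (c : κ) :
    (PySem.Dict.mk l).get? c = (l.find? (fun e => e.1 == c)).map (fun e => e.2) := by
  induction l with
  | nil => rfl
  | cons e l ih =>
      rw [PySem.Dict.get?_mk_cons, List.find?_cons]
      by_cases h : e.1 == c
      · simp [h]
      · simp only [h, Bool.false_eq_true, if_false]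
        exact ih

-- searching a family of cons-blocks: only the block whose label is the head char can match
lemma block_find? (c : Char) (cs : List Char) (es : List (Char × Nat))
    (f : Nat → List (List Char × Nat)) (hnd : (es.map (fun e => e.1)).Nodup) :
    (es.flatMap (fun e => (f e.2).map (fun p => (e.1 :: p.1, p.2)))).find?
        (fun p => p.1.isPrefixOf (c :: cs))
    = match es.find? (fun e => e.1 == c) with
      | none => none
      | some e => ((f e.2).find? (fun p => p.1.isPrefixOf cs)).map (fun p => (c :: p.1, p.2)) := by
  induction es with
  | nil => rfl
  | cons e es ih =>
      simp only [List.map_cons, List.nodup_cons] at hnd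
      rw [List.flatMap_cons, List.find?_append, List.find?_map, List.find?_cons]
      by_cases hc : e.1 = c
      · subst hc
        simp only [BEq.rfl]
        simp only [Function.comp_def]
        rw [find?_congr' (f e.2) _ (fun p => p.1.isPrefixOf cs)
              (fun p _ => by simp [List.isPrefixOf])]
        cases hf : (f e.2).find? (fun p => p.1.isPrefixOf cs) with
        | some a => simp
        | none =>
            simp only [Option.map_none, Option.none_or]
            rw [List.find?_eq_none]
            intro x hx
            rcases List.mem_flatMap.mp hx with ⟨e', he', hxe⟩
            rcases List.mem_map.mp hxe with ⟨y, hy, rfl⟩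
            have hne : e'.1 ≠ e.1 := fun h => hnd.1 (h ▸ List.mem_map_of_mem he')
            simp [List.isPrefixOf, hne]
      · have hbeq : (e.1 == c) = false := beq_eq_false_iff_ne.mpr hc
        simp only [hbeq]
        simp only [Function.comp_def]
        have hdead : ((f e.2).find? fun p : List Char × Nat =>
            (e.1 :: p.1).isPrefixOf (c :: cs)) = none := by
          rw [List.find?_eq_none]
          intro x _
          simp [List.isPrefixOf, hc]
        rw [hdead]
        simpa using ih hnd.2

-- the trie walk is first-match over the key set below the node
lemma walk_eq : ∀ (cs : List Char) (n : Nat), n < 113 →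
    walk cs n = ((sub 6 n).find? (fun p => p.1.isPrefixOf cs)).map (fun p => p.2) := by
  intro cs
  induction cs with
  | nil =>
      intro n hn
      rw [walk, sub_rec n hn]
      cases hv : (nodeAt n).2 with
      | some i => simp [List.isPrefixOf]
      | none =>
          simp only [List.nil_append]
          rw [List.find?_eq_none.mpr, Option.map_none]
          intro x hx
          rcases List.mem_flatMap.mp hx with ⟨e, he, hxe⟩
          rcases List.mem_map.mp hxe with ⟨y, hy, rfl⟩
          simp [List.isPrefixOf]
  | cons c cs ih =>
      intro n hn
      rw [walk, sub_rec n hn]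
      cases hv : (nodeAt n).2 with
      | some i => simp [List.isPrefixOf]
      | none =>
          simp only [List.nil_append]
          have heta : (nodeAt n).1 = PySem.Dict.mk (nodeAt n).1.items := rfl
          rw [heta, dict_get?_eq_find?,
              block_find? c cs _ (fun t => sub 6 t) (edge_nodup n hn)]
          cases he : (nodeAt n).1.items.find? (fun e => e.1 == c) with
          | none => rfl
          | some e =>
              have hlt : e.2 < 113 :=
                edge_lt n hn e (List.mem_of_find?_eq_some he)
              simp only [Option.map_some]
              rw [ih e.2 hlt, Option.map_map]
              rfl

-- first match over the table = trie walk, through mapfn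
lemma find_LTab_eq (g : String) :
    LTab.find? (swPred g)
      = ((sub 6 0).find? (fun p => p.1.isPrefixOf g.toList)).map mapfn := by
  rw [find?_eq_of_unique LTab ((sub 6 0).map mapfn) (swPred g) sub_root_perm.symm (unique_match g),
      List.find?_map]
  exact congrArg (Option.map mapfn)
    (find?_congr' _ _ _ (fun p _ => swPred_map g p))

-- A's scan agrees with B's walk (up to the mechanism lookup)
lemma scan_eq_walk (g : String) :
    aScan MECHANISM_MAPPING g = (walk g.toList 0).map (fun i => MECHS.getD i "") := by
  rw [aScan_eq_find, lower_map_eq, find_LTab_eq, walk_eq g.toList 0 (by norm_num),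
      Option.map_map, Option.map_map]
  rfl

-- when nothing matched, the unreachable fallback startswith tests are false
lemma no_match_false (g : String) (h : walk g.toList 0 = none) (k v : String)
    (hk : (k, v) ∈ LTab) : PySem.Str.startswith g k = false := by
  have hf : LTab.find? (swPred g) = none := by
    rw [find_LTab_eq, walk_eq g.toList 0 (by norm_num)] at *
    rcases Option.map_eq_none_iff.mp h with h'
    rw [h']; rfl
  have := (List.find?_eq_none.mp hf) (k, v) hk
  simpa [swPred] using this

-- ===== VERDICT (by name: the statement is the Claim_ definition above) =====
set_option maxRecDepth 65536 in
theorem get_mechanism_spec : Claim_equal_get_mechanism := by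
  intro gene_name _
  unfold Spec_get_mechanism get_mechanism get_mechanism_alt
  rw [scan_eq_walk]
  cases hw : walk (PySem.Str.lower gene_name).toList 0 with
  | some i => rfl
  | none =>
      have htet := no_match_false _ hw "tet" "Tetracycline Efflux/Ribosomal Protection" (by decide)
      have haac := no_match_false _ hw "aac" "Aminoglycoside Acetyltransferase (Drug Inactivation)" (by decide)
      have haad := no_match_false _ hw "aad" "Aminoglycoside Adenylyltransferase (Drug Inactivation)" (by decide)
      have hant := no_match_false _ hw "ant" "Aminoglycoside Nucleotidyltransferase (Drug Inactivation)" (by decide)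
      have haph := no_match_false _ hw "aph" "Aminoglycoside Phosphotransferase (Drug Inactivation)" (by decide)
      have htet' : PySem.Chars.startswith (PySem.Chars.lower gene_name.toList) ['t', 'e', 't'] = false := by
        simpa using htet
      have haac' : PySem.Chars.startswith (PySem.Chars.lower gene_name.toList) ['a', 'a', 'c'] = false := by
        simpa using haac
      have haad' : PySem.Chars.startswith (PySem.Chars.lower gene_name.toList) ['a', 'a', 'd'] = false := by
        simpa using haad
      have hant' : PySem.Chars.startswith (PySem.Chars.lower gene_name.toList) ['a', 'n', 't'] = false := by
        simpa using hant
      have haph' : PySem.Chars.startswith (PySem.Chars.lower gene_name.toList) ['a', 'p', 'h'] = false := by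
        simpa using haph
      simp [htet', haac', haad', hant', haph', MECHS]
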